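-- pv_equiv track=rewrite | github.com/cinai/teacher_discourse_form | discourse_form/views.py | clean_spaces
-- ===== SOURCE A (Python) =====
-- def clean_spaces(a_list):
--     new_list = []
--     initial = -1
--     for i,element in enumerate(a_list):
--         if element == "":
--             if initial == -1:
--                 initial = i
--         else:
--             if initial != -1:
--                 seconds = (i-initial)*15
--                 if seconds > 60:
--                     if int(seconds/60) > 1:
--                         new_list.append('*** Sin transcripción disponible durante '+ str(int(seconds/60)) +' minutos ***')
--                     else:
--                         new_list.append('*** Sin transcripción disponible durante '+ str(int(seconds/60)) +' minuto ***')
--                 else: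
--                     new_list.append('*** Sin transcripción disponible durante '+ str(seconds) +' segundos ***')
--                 initial = -1
--             new_list.append(element)
--     return new_list
-- ===== SOURCE B (Python) =====
-- def _gap_message(run):
--     seconds = run * 15
--     if seconds > 60:
--         minutes = seconds // 60
--         if minutes > 1:
--             return '*** Sin transcripci\u00f3n disponible durante ' + str(minutes) + ' minutos ***'
--         return '*** Sin transcripci\u00f3n disponible durante ' + str(minutes) + ' minuto ***'
--     return '*** Sin transcripci\u00f3n disponible durante ' + str(seconds) + ' segundos ***'
--
--
-- def clean_spaces(a_list):
--     # Stage 1: keep only the non-empty elements, tagged with their positions.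
--     items = [(i, e) for i, e in enumerate(a_list) if e != ""]
--     # Stage 2: adjacent-difference pass over the kept entries: a jump of more than
--     # 1 between consecutive kept indices is a transcription gap of that many slots.
--     out = []
--     for (prev, _), (i, e) in zip([(-1, '')] + items, items):
--         gap = i - prev - 1
--         if gap > 0:
--             out.append(_gap_message(gap))
--         out.append(e)
--     return out
-- ===== Notes on version B (the rewrite author's own statement) =====
-- stated objective: alternative
-- what changed: B replaces A's run-tracking state machine (sentinel start index reset inline) by two staged passes: filter the non-empty elements with their positions, then an adjacent-difference pass over consecutive kept indices, where an index jump > 1 yields the gap message; trailing empties vanish by construction.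
import Mathlib
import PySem

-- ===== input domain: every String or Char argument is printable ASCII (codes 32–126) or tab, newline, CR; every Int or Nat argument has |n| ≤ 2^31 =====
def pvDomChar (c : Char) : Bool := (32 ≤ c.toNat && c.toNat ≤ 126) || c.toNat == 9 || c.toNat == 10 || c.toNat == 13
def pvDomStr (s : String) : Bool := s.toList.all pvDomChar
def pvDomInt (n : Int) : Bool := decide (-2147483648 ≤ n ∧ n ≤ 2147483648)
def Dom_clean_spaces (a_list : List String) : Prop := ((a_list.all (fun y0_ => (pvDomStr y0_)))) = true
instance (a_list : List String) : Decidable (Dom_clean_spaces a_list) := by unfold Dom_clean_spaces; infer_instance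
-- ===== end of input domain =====

-- B replaces A's run-tracking state machine by two staged passes: filter the non-empty
-- elements with their positions, then an adjacent-difference pass over consecutive kept
-- indices emitting a gap message for jumps > 1 (objective: alternative algorithm).

-- ===== PORT A =====
-- state = (new_list, initial); int(seconds/60) is ported as Int.tdiv (truncation toward 0),
-- exact here: seconds is a nonnegative int and the float quotient is exact at these magnitudes.
def pvStepA (st : List String × Int) (p : Int × String) : List String × Int :=
  if p.2 = "" then
    (st.1, if st.2 = -1 then p.1 else st.2)
  else
    if st.2 ≠ -1 then
      let seconds := (p.1 - st.2) * 15
      let msg :=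
        if seconds > 60 then
          if seconds.tdiv 60 > 1 then
            "*** Sin transcripción disponible durante " ++ PySem.Int.toStr (seconds.tdiv 60) ++ " minutos ***"
          else
            "*** Sin transcripción disponible durante " ++ PySem.Int.toStr (seconds.tdiv 60) ++ " minuto ***"
        else
          "*** Sin transcripción disponible durante " ++ PySem.Int.toStr seconds ++ " segundos ***"
      (st.1 ++ [msg, p.2], -1)
    else
      (st.1 ++ [p.2], st.2)

def clean_spaces (a_list : List String) : List String :=
  ((PySem.List.enumerate a_list 0).foldl pvStepA ([], -1)).1

-- ===== PORT B =====
def pvGapMsg (run : Int) : String :=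
  let seconds := run * 15
  if seconds > 60 then
    let minutes := PySem.Int.floordiv seconds 60
    if minutes > 1 then
      "*** Sin transcripción disponible durante " ++ PySem.Int.toStr minutes ++ " minutos ***"
    else
      "*** Sin transcripción disponible durante " ++ PySem.Int.toStr minutes ++ " minuto ***"
  else
    "*** Sin transcripción disponible durante " ++ PySem.Int.toStr seconds ++ " segundos ***"

-- items = [(i, e) for i, e in enumerate(a_list) if e != ""]
def pvItems (a_list : List String) : List (Int × String) :=
  (PySem.List.enumerate a_list 0).filter (fun p => p.2 != "")

-- loop body of the zip([(-1, '')] + items, items) pass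
def pvEmitStep (out : List String) (pq : (Int × String) × (Int × String)) : List String :=
  let gap := pq.2.1 - pq.1.1 - 1
  (if gap > 0 then out ++ [pvGapMsg gap] else out) ++ [pq.2.2]

def clean_spaces_alt (a_list : List String) : List String :=
  (List.zip (((-1 : Int), "") :: pvItems a_list) (pvItems a_list)).foldl pvEmitStep []

-- ===== PRECONDITION & SPEC =====
def Spec_clean_spaces (a_list : List String) (out : List String) : Prop := out = clean_spaces_alt a_list
instance (a_list : List String) (out : List String) : Decidable (Spec_clean_spaces a_list out) := by unfold Spec_clean_spaces; infer_instance

-- ===== CLAIM (what is proved, stated in full; the proofs are below) =====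
def Claim_equal_clean_spaces : Prop := ∀ (a_list : List String), Dom_clean_spaces a_list → Spec_clean_spaces a_list (clean_spaces a_list)

-- ===== LEMMAS AND PROOFS =====

-- A's inline message for a run of `run` empties equals B's helper.
lemma pvMsg_eq (run : Int) (h : 0 < run) :
    (if run * 15 > 60 then
      if (run * 15).tdiv 60 > 1 then
        "*** Sin transcripción disponible durante " ++ PySem.Int.toStr ((run * 15).tdiv 60) ++ " minutos ***"
      else
        "*** Sin transcripción disponible durante " ++ PySem.Int.toStr ((run * 15).tdiv 60) ++ " minuto ***"
    else
      "*** Sin transcripción disponible durante " ++ PySem.Int.toStr (run * 15) ++ " segundos ***")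
    = pvGapMsg run := by
  have htd : (run * 15).tdiv 60 = PySem.Int.floordiv (run * 15) 60 := by
    rw [PySem.Int.floordiv_eq_ediv_of_pos (by norm_num)]
    exact Int.tdiv_eq_ediv_of_nonneg (by positivity)
  simp only [pvGapMsg, htd]

-- recursive reference form of A's loop over the (index, element) pairs
def pvRA : Int → Int → List String → List String
  | _, _, [] => []
  | init, s, x :: xs =>
    if x = "" then pvRA (if init = -1 then s else init) (s + 1) xs
    else (if init ≠ -1 then [pvGapMsg (s - init)] else []) ++ x :: pvRA (-1) (s + 1) xs

-- recursive reference form of B's adjacent-difference pass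
def pvRB : Int → List (Int × String) → List String
  | _, [] => []
  | prev, (i, e) :: rest =>
      (if i - prev - 1 > 0 then [pvGapMsg (i - prev - 1)] else []) ++ e :: pvRB i rest

lemma pvFoldA (l : List String) : ∀ (s init : Int) (out : List String),
    (init = -1 ∨ init < s) →
    ((PySem.List.enumerate l s).foldl pvStepA (out, init)).1 = out ++ pvRA init s l := by
  induction l with
  | nil => intro s init out _; simp [PySem.List.enumerate_nil, pvRA]
  | cons x xs ih =>
    intro s init out hinv
    rw [PySem.List.enumerate_cons, List.foldl_cons]
    by_cases hx : x = ""
    · have hA : pvStepA (out, init) (s, x) = (out, if init = -1 then s else init) := by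
        simp [pvStepA, hx]
      rw [hA, pvRA, if_pos hx]
      by_cases hi : init = -1
      · rw [if_pos hi]; exact ih (s + 1) s out (Or.inr (by omega))
      · rw [if_neg hi]
        exact ih (s + 1) init out (Or.inr (by omega))
    · by_cases hi : init = -1
      · have hA : pvStepA (out, init) (s, x) = (out ++ [x], init) := by
          simp [pvStepA, hx, hi]
        rw [hA, pvRA, if_neg hx, if_neg (by simp [hi])]
        have h := ih (s + 1) (-1) (out ++ [x]) (Or.inl rfl)
        rw [hi, h, List.append_assoc]
        rfl
      · have hrun : (0 : Int) < s - init := by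
          have := hinv.resolve_left hi; omega
        have hA : pvStepA (out, init) (s, x) = (out ++ [pvGapMsg (s - init), x], -1) := by
          simp only [pvStepA, hx, hi, ne_eq, not_false_iff, if_true, if_false]
          rw [pvMsg_eq (s - init) hrun]
        rw [hA, pvRA, if_neg hx, if_pos (by simp [hi])]
        have h := ih (s + 1) (-1) (out ++ [pvGapMsg (s - init), x]) (Or.inl rfl)
        rw [h, List.append_assoc]
        rfl

lemma pvZipFold (items : List (Int × String)) : ∀ (p : Int × String) (out : List String),
    ((List.zip (p :: items) items).foldl pvEmitStep out) = out ++ pvRB p.1 items := by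
  induction items with
  | nil => intro p out; simp [pvRB]
  | cons q rest ih =>
    intro p out
    rw [List.zip_cons_cons, List.foldl_cons]
    have : pvEmitStep out (p, q) =
        (if q.1 - p.1 - 1 > 0 then out ++ [pvGapMsg (q.1 - p.1 - 1)] else out) ++ [q.2] := rfl
    rw [this, ih q]
    cases q with
    | mk i e =>
      rw [pvRB]
      split_ifs with hg <;> simp [List.append_assoc]

lemma pvBridge (l : List String) : ∀ (s init : Int),
    0 ≤ s → (init = -1 ∨ init < s) →
    pvRA init s l
      = pvRB (if init = -1 then s - 1 else init - 1)
          ((PySem.List.enumerate l s).filter (fun p => p.2 != "")) := by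
  induction l with
  | nil => intro s init _ _; simp [PySem.List.enumerate_nil, pvRA, pvRB]
  | cons x xs ih =>
    intro s init hs hinv
    rw [PySem.List.enumerate_cons, pvRA]
    by_cases hx : x = ""
    · rw [if_pos hx, List.filter_cons_of_neg (by simp [hx])]
      by_cases hi : init = -1
      · rw [if_pos hi]
        have h := ih (s + 1) s (by omega) (Or.inr (by omega))
        rw [if_neg (by omega)] at h
        rw [h, if_pos hi]
      · rw [if_neg hi]
        have h' : init < s := hinv.resolve_left hi
        have h := ih (s + 1) init (by omega) (Or.inr (by omega))
        rw [if_neg hi] at h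
        rw [if_neg hi]
        exact h
    · rw [if_neg hx, List.filter_cons_of_pos (by simp [hx]), pvRB]
      have htail := ih (s + 1) (-1) (by omega) (Or.inl rfl)
      rw [if_pos rfl] at htail
      have e1 : s + 1 - 1 = s := by ring
      rw [e1] at htail
      by_cases hi : init = -1
      · rw [if_pos hi, if_neg (by simp [hi]),
          if_neg (show ¬ (s - (s - 1) - 1 > 0) by omega), htail]
      · have hrun : (0 : Int) < s - init := by
          have := hinv.resolve_left hi; omega
        rw [if_neg hi, if_pos (by simp [hi]),
          if_pos (show s - (init - 1) - 1 > 0 by omega),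
          show s - (init - 1) - 1 = s - init by ring, htail]

-- ===== VERDICT (by name: the statement is the Claim_ definition above) =====
theorem clean_spaces_spec : Claim_equal_clean_spaces := by
  intro a_list _
  show clean_spaces a_list = clean_spaces_alt a_list
  have hA := pvFoldA a_list 0 (-1) [] (Or.inl rfl)
  have hB := pvZipFold (pvItems a_list) ((-1 : Int), "") []
  have hbr := pvBridge a_list 0 (-1) le_rfl (Or.inl rfl)
  rw [if_pos rfl] at hbr
  unfold clean_spaces clean_spaces_alt
  rw [hA, hB]
  simp only [List.nil_append]
  rw [hbr]
  norm_num [pvItems]
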